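-- pv_equiv track=rewrite | github.com/AqsaAmjad037/PROCABLES | DeepPromoter.py | check_fasta_with_equal_length
-- ===== SOURCE A (Python) =====
-- def check_fasta_with_equal_length(fastas):
--     status = True
--     lenList = set()
--     for i in fastas:
--         lenList.add(len(i[1]))
--     if len(lenList) == 1:
--         return True
--     else:
--         return False
-- ===== SOURCE B (Python) =====
-- def check_fasta_with_equal_length(fastas):
--     if not fastas:
--         return False
--     first = len(fastas[0][1])
--     return all(len(i[1]) == first for i in fastas)
-- ===== Notes on version B (the rewrite author's own statement) =====
-- stated objective: simpler
-- what changed: Replaces the set accumulation of distinct lengths with a scalar reference (length of the first sequence) and a short-circuiting all() comparison, guarding the empty list explicitly.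
import Mathlib
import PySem

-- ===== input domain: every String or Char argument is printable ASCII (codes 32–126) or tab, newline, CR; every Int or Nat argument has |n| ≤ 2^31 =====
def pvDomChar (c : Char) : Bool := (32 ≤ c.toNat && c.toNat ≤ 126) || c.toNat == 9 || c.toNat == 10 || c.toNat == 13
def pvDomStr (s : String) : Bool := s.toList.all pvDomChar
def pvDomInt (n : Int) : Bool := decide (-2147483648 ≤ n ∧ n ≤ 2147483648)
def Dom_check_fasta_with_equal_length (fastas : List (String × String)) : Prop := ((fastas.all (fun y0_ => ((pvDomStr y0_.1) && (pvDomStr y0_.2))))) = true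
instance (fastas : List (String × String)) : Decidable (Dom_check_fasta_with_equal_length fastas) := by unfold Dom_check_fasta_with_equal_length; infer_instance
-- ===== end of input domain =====

-- B replaces A's set of distinct lengths by a scalar reference length and an all() scan (simpler; same cost).

-- ===== PORT A =====
-- literal port of A: build the set of sequence lengths, then test whether it has exactly one element
def check_fasta_with_equal_length (fastas : List (String × String)) : Bool :=
  let lenList : PySem.Set Int :=
    fastas.foldl (fun s i => PySem.Set.add s (PySem.Str.len i.2)) PySem.Set.empty
  if PySem.Set.len lenList == 1 then true else false

-- ===== PORT B =====
-- literal port of B: empty guard, then compare every length against the first sequence's length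
def check_fasta_with_equal_length_alt (fastas : List (String × String)) : Bool :=
  match fastas with
  | [] => false
  | x :: rest =>
    let first := PySem.Str.len x.2
    (x :: rest).all (fun i => PySem.Str.len i.2 == first)

-- ===== PRECONDITION & SPEC =====
def Spec_check_fasta_with_equal_length (fastas : List (String × String)) (out : Bool) : Prop := out = check_fasta_with_equal_length_alt fastas
instance (fastas : List (String × String)) (out : Bool) : Decidable (Spec_check_fasta_with_equal_length fastas out) := by unfold Spec_check_fasta_with_equal_length; infer_instance

-- ===== CLAIM (what is proved, stated in full; the proofs are below) =====
def Claim_equal_check_fasta_with_equal_length : Prop := ∀ (fastas : List (String × String)), Dom_check_fasta_with_equal_length fastas → Spec_check_fasta_with_equal_length fastas (check_fasta_with_equal_length fastas)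

-- ===== LEMMAS AND PROOFS =====

-- the set of a nonempty list has exactly one element iff every element equals the head
theorem ofList_length_one_iff (a : Int) (ls : List Int) :
    (PySem.Set.ofList (a :: ls)).length = 1 ↔ ∀ x ∈ ls, x = a := by
  rw [PySem.Set.ofList_cons]
  simp only [List.length_cons]
  constructor
  · intro h x hx
    have hnil : (PySem.Set.ofList ls).discard a = [] :=
      List.eq_nil_of_length_eq_zero (by omega)
    by_contra hne
    have hm : x ∈ (PySem.Set.ofList ls).discard a := by
      rw [PySem.Set.mem_discard]
      exact ⟨(PySem.Set.mem_ofList ls x).mpr hx, hne⟩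
    rw [hnil] at hm
    exact absurd hm (List.not_mem_nil)
  · intro h
    have hnil : (PySem.Set.ofList ls).discard a = [] := by
      rw [List.eq_nil_iff_forall_not_mem]
      intro y hy
      rw [PySem.Set.mem_discard, PySem.Set.mem_ofList] at hy
      exact hy.2 (h y hy.1)
    rw [hnil]
    rfl

-- A's fold is set(map length)
theorem foldA_eq_ofList (fastas : List (String × String)) :
    fastas.foldl (fun s i => PySem.Set.add s (PySem.Str.len i.2)) PySem.Set.empty
      = PySem.Set.ofList (fastas.map (fun i => PySem.Str.len i.2)) := by
  rw [← PySem.Set.update_map_eq_foldl_add]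
  rfl

-- ===== VERDICT (by name: the statement is the Claim_ definition above) =====
theorem check_fasta_with_equal_length_spec : Claim_equal_check_fasta_with_equal_length := by
  intro fastas _
  unfold Spec_check_fasta_with_equal_length check_fasta_with_equal_length check_fasta_with_equal_length_alt
  rw [foldA_eq_ofList]
  cases fastas with
  | nil => decide
  | cons x rest =>
    have hiff : ((PySem.Set.len (PySem.Set.ofList
        ((x :: rest).map (fun i => PySem.Str.len i.2))) == 1) = true) ↔
        (((x :: rest).all (fun i => PySem.Str.len i.2 == PySem.Str.len x.2)) = true) := by
      simp only [List.map_cons, PySem.Set.len, beq_iff_eq, Nat.cast_eq_one,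
        ofList_length_one_iff, List.all_cons, beq_self_eq_true, Bool.true_and,
        List.all_eq_true, List.mem_map, forall_exists_index, and_imp]
      constructor
      · intro h i hi
        exact h _ i hi rfl
      · intro h y i hi hy
        exact hy ▸ h i hi
    show (if (PySem.Set.len (PySem.Set.ofList
        ((x :: rest).map (fun i => PySem.Str.len i.2))) == 1) = true then true else false)
      = ((x :: rest).all (fun i => PySem.Str.len i.2 == PySem.Str.len x.2))
    rcases Bool.eq_false_or_eq_true
        ((x :: rest).all (fun i => PySem.Str.len i.2 == PySem.Str.len x.2)) with hall | hall
    · rw [hall, if_pos (hiff.mpr hall)]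
    · rw [hall, if_neg]
      intro hc
      rw [hall] at hiff
      exact absurd (hiff.mp hc) (by simp)
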